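-- pv_equiv track=rewrite | github.com/mpolimen/advent_of_code | days/day15.py | safest_path
-- ===== SOURCE A (Python) =====
-- def enlarge_cave(cave):
--     n, m = len(cave), len(cave[0])
--     for i in range(1, 5):
--         for r in range(n):
--             for c in range(m):
--                 val = cave[r][c]
--                 cave[r].append(val+i if val+i < 10 else (val+i) % 9)
--     m = len(cave[0])
--     for i in range(1, 5):
--         for r in range(n):
--             tmp = []
--             for c in range(m):
--                 val = cave[r][c]
--                 tmp.append(val+i if val+i < 10 else (val+i) % 9)
--             cave.append(tmp)
--     return cave
--
-- def safest_path(cave, adv=True):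
--     cave = cave if not adv else enlarge_cave(cave)
--     edges = {(0, 0): ((0, 0), 0)}
--     curr_vertex, dist, n, m = (0, 0), 0, len(cave), len(cave[0])
--     reachable = {}
--     def find_reachable(vertex, dist):
--         x, y = vertex
--         pos = (x-1, y)
--         if (x > 0 and pos not in edges and
--             (pos not in reachable or reachable[pos][1] > cave[y][x-1] + dist)):
--             reachable[pos] = ((x, y), cave[y][x-1] + dist)
--         pos = (x+1, y)
--         if (x < m-1 and pos not in edges and
--             (pos not in reachable or reachable[pos][1] > cave[y][x+1] + dist)):
--             reachable[pos] = ((x, y), cave[y][x+1] + dist)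
--         pos = (x, y-1)
--         if (y > 0 and pos not in edges and
--             (pos not in reachable or reachable[pos][1] > cave[y-1][x] + dist)):
--             reachable[pos] = ((x, y), cave[y-1][x] + dist)
--         pos = (x, y+1)
--         if (y < n-1 and pos not in edges and
--             (pos not in reachable or reachable[pos][1] > cave[y+1][x] + dist)):
--             reachable[pos] = ((x, y), cave[y+1][x] + dist)
--     while curr_vertex != (m-1, n-1):
--         find_reachable(curr_vertex, dist)
--         to_vertex = min(reachable, key=lambda k: reachable[k][1])
--         edges[to_vertex] = reachable[to_vertex]
--         curr_vertex, dist = to_vertex, reachable[to_vertex][1]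
--         reachable.pop(to_vertex)
--     return dist
-- ===== SOURCE B (Python) =====
-- # Dijkstra with a sorted frontier kept via bisect (O(log F) search + O(1) min pop)
-- # instead of A's full O(F) scan of an unsorted dict at every step.
-- # Note: A mutates `cave` in place when adv is true (enlarge_cave appends); B leaves it untouched.
-- import bisect
--
-- def _bump(v, k):
--     w = v + k
--     return w if w < 10 else w % 9
--
-- def _cell(v, i, j):
--     h = v if j == 0 else _bump(v, j)
--     return h if i == 0 else _bump(h, i)
--
-- def safest_path(cave, adv=True):
--     if adv:
--         grid = [[_cell(v, i, j) for j in range(5) for v in row]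
--                 for i in range(5) for row in cave]
--     else:
--         grid = cave
--     n, m = len(grid), len(grid[0])
--     settled = set()
--     entry = {}          # frontier vertex -> (tentative dist, discovery rank)
--     frontier = []       # sorted list of (dist, rank, vertex)
--     counter = 0
--     x, y, d = 0, 0, 0
--     while (x, y) != (m - 1, n - 1):
--         settled.add((x, y))
--         for nx, ny in ((x - 1, y), (x + 1, y), (x, y - 1), (x, y + 1)):
--             if 0 <= nx < m and 0 <= ny < n and (nx, ny) not in settled:
--                 nd = d + grid[ny][nx]
--                 if (nx, ny) not in entry:
--                     bisect.insort(frontier, (nd, counter, (nx, ny)))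
--                     entry[(nx, ny)] = (nd, counter)
--                     counter += 1
--                 elif nd < entry[(nx, ny)][0]:
--                     od, ot = entry[(nx, ny)]
--                     frontier.pop(bisect.bisect_left(frontier, (od, ot, (nx, ny))))
--                     bisect.insort(frontier, (nd, ot, (nx, ny)))
--                     entry[(nx, ny)] = (nd, ot)
--         d, _, (x, y) = frontier.pop(0)
--         del entry[(x, y)]
--     return d
-- ===== Notes on version B (the rewrite author's own statement) =====
-- stated objective: faster
-- what changed: A rescans its whole unsorted frontier dict for the minimum at every step; B keeps the frontier as a list sorted by (dist, discovery rank) maintained with bisect, so the next vertex is popped from the front and decrease-key is a binary-search remove/insert, and B builds the enlarged grid by comprehension instead of mutating the input.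
-- outside the precondition, e.g. on safest_path([[1], [2, 5]], True): A returns 65, B returns 57
import Mathlib
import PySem

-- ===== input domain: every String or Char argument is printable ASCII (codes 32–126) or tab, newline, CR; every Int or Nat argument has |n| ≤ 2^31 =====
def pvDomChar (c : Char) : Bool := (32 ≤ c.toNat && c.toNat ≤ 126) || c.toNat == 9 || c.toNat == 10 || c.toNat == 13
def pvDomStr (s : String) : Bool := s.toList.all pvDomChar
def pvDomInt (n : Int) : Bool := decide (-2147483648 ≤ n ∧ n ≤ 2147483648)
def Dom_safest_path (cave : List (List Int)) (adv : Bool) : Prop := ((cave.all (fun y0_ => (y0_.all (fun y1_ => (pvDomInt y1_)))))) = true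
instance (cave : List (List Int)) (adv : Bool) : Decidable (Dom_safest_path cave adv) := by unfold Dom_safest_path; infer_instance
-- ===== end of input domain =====

-- B replaces A's per-step linear min-scan of an unsorted dict frontier by a frontier kept
-- sorted (bisect insert/remove, pop the head), tie-broken by discovery rank so the selection
-- order is identical; equivalence is about the RETURN value (A mutates `cave` when adv=true, B does not).

-- ===== PORT A =====
def bumpA (v i : Int) : Int := if v + i < 10 then v + i else PySem.Int.mod (v + i) 9

def enlargeA (cave : List (List Int)) : List (List Int) :=
  let n : Int := (cave.length : Int)
  let m : Int := ((cave.headD []).length : Int)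
  -- for i in 1..4: for r: for c in range(m): cave[r].append(bump)
  let cave1 := (PySem.List.pyRange 1 5 1).foldl (fun cv i =>
    cv.map (fun row => row ++ (PySem.List.pyRange 0 m 1).map (fun c => bumpA (PySem.List.pyGetD row c 0) i))) cave
  let m2 : Int := ((cave1.headD []).length : Int)
  -- for i in 1..4: for r in range(n): cave.append([bump(cave[r][c], i) for c in range(m2)])
  (PySem.List.pyRange 1 5 1).foldl (fun cv i =>
    (PySem.List.pyRange 0 n 1).foldl (fun cv2 r =>
      cv2 ++ [(PySem.List.pyRange 0 m2 1).map (fun c =>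
        bumpA (PySem.List.pyGetD (PySem.List.pyGetD cv2 r []) c 0) i)]) cv) cave1

-- find_reachable: four sequential conditional updates of `reachable`
def findReachableA (cave : List (List Int)) (n m : Int)
    (edges reach : PySem.Dict (Int × Int) ((Int × Int) × Int))
    (v : Int × Int) (dist : Int) : PySem.Dict (Int × Int) ((Int × Int) × Int) :=
  let x := v.1
  let y := v.2
  let g : Int → Int → Int := fun yy xx => PySem.List.pyGetD (PySem.List.pyGetD cave yy []) xx 0
  let r1 := if x > 0 ∧ edges.contains (x-1, y) = false ∧
      (reach.contains (x-1, y) = false ∨ (reach.getD (x-1, y) ((0,0),0)).2 > g y (x-1) + dist)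
    then reach.insert (x-1, y) ((x, y), g y (x-1) + dist) else reach
  let r2 := if x < m - 1 ∧ edges.contains (x+1, y) = false ∧
      (r1.contains (x+1, y) = false ∨ (r1.getD (x+1, y) ((0,0),0)).2 > g y (x+1) + dist)
    then r1.insert (x+1, y) ((x, y), g y (x+1) + dist) else r1
  let r3 := if y > 0 ∧ edges.contains (x, y-1) = false ∧
      (r2.contains (x, y-1) = false ∨ (r2.getD (x, y-1) ((0,0),0)).2 > g (y-1) x + dist)
    then r2.insert (x, y-1) ((x, y), g (y-1) x + dist) else r2
  if y < n - 1 ∧ edges.contains (x, y+1) = false ∧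
      (r3.contains (x, y+1) = false ∨ (r3.getD (x, y+1) ((0,0),0)).2 > g (y+1) x + dist)
    then r3.insert (x, y+1) ((x, y), g (y+1) x + dist) else r3

def loopA (cave : List (List Int)) (n m : Int) :
    Nat → (Int × Int) → Int → PySem.Dict (Int × Int) ((Int × Int) × Int) →
    PySem.Dict (Int × Int) ((Int × Int) × Int) → Int
  | 0, _, dist, _, _ => dist
  | fuel+1, curr, dist, edges, reach =>
    if curr = (m - 1, n - 1) then dist
    else
      let reach := findReachableA cave n m edges reach curr dist
      if reach.size = 0 then 0  -- Python: min of an empty dict raises ValueError (never under Pre_)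
      else
        let tv := PySem.List.minD reach.keys (fun k => (reach.getD k ((0,0),0)).2) (0, 0)
        loopA cave n m fuel tv (reach.getD tv ((0,0),0)).2
          (edges.insert tv (reach.getD tv ((0,0),0))) (reach.erase tv)

def safest_path (cave : List (List Int)) (adv : Bool) : Int :=
  let cave := if !adv then cave else enlargeA cave
  let n : Int := (cave.length : Int)
  let m : Int := ((cave.headD []).length : Int)
  let edges : PySem.Dict (Int × Int) ((Int × Int) × Int) := PySem.Dict.empty.insert (0, 0) ((0, 0), 0)
  loopA cave n m (cave.length * (cave.headD []).length + 1) (0, 0) 0 edges PySem.Dict.empty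

-- ===== PORT B =====
def bumpB (v k : Int) : Int := let w := v + k; if w < 10 then w else PySem.Int.mod w 9

def cellB (v i j : Int) : Int :=
  let h := if j = 0 then v else bumpB v j
  if i = 0 then h else bumpB h i

def enlargeB (cave : List (List Int)) : List (List Int) :=
  (PySem.List.pyRange 0 5 1).flatMap (fun i =>
    cave.map (fun row => (PySem.List.pyRange 0 5 1).flatMap (fun j => row.map (fun v => cellB v i j))))

-- a frontier entry (dist, rank, (x, y)); Python compares these tuples lexicographically
def lexLtE (a b : Int × Int × (Int × Int)) : Bool :=
  decide (a.1 < b.1) || (a.1 == b.1 && (decide (a.2.1 < b.2.1) ||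
    (a.2.1 == b.2.1 && (decide (a.2.2.1 < b.2.2.1) ||
      (a.2.2.1 == b.2.2.1 && decide (a.2.2.2 < b.2.2.2))))))

-- bisect.insort frontier e : insert e before the first strictly greater element
-- (exact on a sorted list, which `frontier` always is)
def insortB : List (Int × Int × (Int × Int)) → (Int × Int × (Int × Int)) → List (Int × Int × (Int × Int))
  | [], e => [e]
  | x :: rest, e => if lexLtE e x then e :: x :: rest else x :: insortB rest e

-- frontier.pop(bisect.bisect_left(frontier, key)) : remove the first element not less than key
-- (exact on a sorted list containing key, which is the only way B calls it)
def delB : List (Int × Int × (Int × Int)) → (Int × Int × (Int × Int)) → List (Int × Int × (Int × Int))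
  | [], _ => []  -- Python would raise IndexError; never reached (key is always present)
  | x :: rest, key => if lexLtE x key then x :: delB rest key else rest

-- one neighbour relaxation; state = (frontier, entry, counter)
def relaxB (grid : List (List Int)) (n m : Int) (settled : PySem.Set (Int × Int)) (d : Int)
    (st : List (Int × Int × (Int × Int)) × PySem.Dict (Int × Int) (Int × Int) × Int)
    (p : Int × Int) : List (Int × Int × (Int × Int)) × PySem.Dict (Int × Int) (Int × Int) × Int :=
  let (frontier, entry, counter) := st
  if 0 ≤ p.1 ∧ p.1 < m ∧ 0 ≤ p.2 ∧ p.2 < n ∧ settled.contains p = false then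
    let nd := d + PySem.List.pyGetD (PySem.List.pyGetD grid p.2 []) p.1 0
    if entry.contains p = false then
      (insortB frontier (nd, counter, p), entry.insert p (nd, counter), counter + 1)
    else if nd < (entry.getD p (0, 0)).1 then
      let od := (entry.getD p (0, 0)).1
      let ot := (entry.getD p (0, 0)).2
      (insortB (delB frontier (od, ot, p)) (nd, ot, p), entry.insert p (nd, ot), counter)
    else (frontier, entry, counter)
  else (frontier, entry, counter)

def loopB (grid : List (List Int)) (n m : Int) :
    Nat → Int → Int → Int → PySem.Set (Int × Int) → PySem.Dict (Int × Int) (Int × Int) →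
    List (Int × Int × (Int × Int)) → Int → Int
  | 0, _, _, d, _, _, _, _ => d
  | fuel+1, x, y, d, settled, entry, frontier, counter =>
    if (x, y) = (m - 1, n - 1) then d
    else
      let settled := settled.add (x, y)
      let st := [(x-1, y), (x+1, y), (x, y-1), (x, y+1)].foldl
        (relaxB grid n m settled d) (frontier, entry, counter)
      match st.1 with
      | [] => 0  -- Python: pop from an empty frontier raises IndexError (never under Pre_)
      | (d', _, v') :: fr =>
        loopB grid n m fuel v'.1 v'.2 d' settled (st.2.1.erase v') fr st.2.2

def safest_path_alt (cave : List (List Int)) (adv : Bool) : Int :=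
  let grid := if adv then enlargeB cave else cave
  let n : Int := (grid.length : Int)
  let m : Int := ((grid.headD []).length : Int)
  loopB grid n m (grid.length * (grid.headD []).length + 1) 0 0 0 PySem.Set.empty PySem.Dict.empty [] 0

-- ===== PRECONDITION & SPEC =====
-- Pre_ excludes the empty cave and non-rectangular caves: there A raises IndexError when a row is
-- shorter than the first, and when a row is longer than the first A reads enlarged cells from
-- shifted positions, an accident of enlarge_cave's in-place appends no caller relies on.
def Pre_safest_path (cave : List (List Int)) (adv : Bool) : Prop :=
  cave ≠ [] ∧ (cave.headD []) ≠ [] ∧ ∀ row ∈ cave, row.length = (cave.headD []).length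

instance (cave : List (List Int)) (adv : Bool) : Decidable (Pre_safest_path cave adv) := by
  unfold Pre_safest_path; infer_instance

def pvWitness_safest_path : List (List Int) × Bool := ([[1, 2], [3, 4]], true)

def Spec_safest_path (cave : List (List Int)) (adv : Bool) (out : Int) : Prop := out = safest_path_alt cave adv
instance (cave : List (List Int)) (adv : Bool) (out : Int) : Decidable (Spec_safest_path cave adv out) := by unfold Spec_safest_path; infer_instance

-- ===== CLAIM (what is proved, stated in full; the proofs are below) =====
def Claim_equal_safest_path : Prop := ∀ (cave : List (List Int)) (adv : Bool), Dom_safest_path cave adv → Pre_safest_path cave adv → Spec_safest_path cave adv (safest_path cave adv)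

-- ===== LEMMAS AND PROOFS =====

-- ---- the lexicographic tuple order used by B's frontier ----
theorem lexLtE_irrefl (a : Int × Int × (Int × Int)) : lexLtE a a = false := by
  simp [lexLtE]

theorem lexLtE_trans {a b c : Int × Int × (Int × Int)} (h1 : lexLtE a b = true)
    (h2 : lexLtE b c = true) : lexLtE a c = true := by
  obtain ⟨a1, a2, a3, a4⟩ := a
  obtain ⟨b1, b2, b3, b4⟩ := b
  obtain ⟨c1, c2, c3, c4⟩ := c
  simp only [lexLtE, Bool.or_eq_true, Bool.and_eq_true, beq_iff_eq, decide_eq_true_eq] at *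
  omega

theorem lexLtE_eq_of_not {a b : Int × Int × (Int × Int)} (h1 : lexLtE a b = false)
    (h2 : lexLtE b a = false) : a = b := by
  obtain ⟨a1, a2, a3, a4⟩ := a
  obtain ⟨b1, b2, b3, b4⟩ := b
  simp only [lexLtE, Bool.or_eq_false_iff, Bool.and_eq_false_iff, decide_eq_false_iff_not,
    beq_eq_false_iff_ne, ne_eq, Prod.mk.injEq] at *
  omega

theorem lexLtE_connex {a b : Int × Int × (Int × Int)} (h : a ≠ b) :
    lexLtE a b = true ∨ lexLtE b a = true := by
  by_cases h1 : lexLtE a b = true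
  · exact Or.inl h1
  · by_cases h2 : lexLtE b a = true
    · exact Or.inr h2
    · exact absurd (lexLtE_eq_of_not (by simpa using h1) (by simpa using h2)) h

-- ---- insortB ----
theorem insortB_perm (xs : List (Int × Int × (Int × Int))) (e : Int × Int × (Int × Int)) :
    (insortB xs e).Perm (e :: xs) := by
  induction xs with
  | nil => simp [insortB]
  | cons x rest ih =>
    simp only [insortB]
    split
    · exact List.Perm.refl _
    · exact (ih.cons x).trans (List.Perm.swap e x rest)

theorem insortB_pairwise (xs : List (Int × Int × (Int × Int))) (e : Int × Int × (Int × Int))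
    (hs : xs.Pairwise (fun a b => lexLtE a b = true)) (hne : ∀ x ∈ xs, x ≠ e) :
    (insortB xs e).Pairwise (fun a b => lexLtE a b = true) := by
  induction xs with
  | nil => simp [insortB]
  | cons x rest ih =>
    rw [List.pairwise_cons] at hs
    simp only [insortB]
    split
    · rename_i hlt
      refine List.pairwise_cons.mpr ⟨?_, List.pairwise_cons.mpr ⟨hs.1, hs.2⟩⟩
      intro y hy
      rcases List.mem_cons.mp hy with hy | hy
      · subst hy; exact hlt
      · exact lexLtE_trans hlt (hs.1 y hy)
    · rename_i hnlt
      have hxe : lexLtE x e = true := by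
        rcases lexLtE_connex (Ne.symm (hne x (by simp))) with h | h
        · exact absurd h (by simpa using hnlt)
        · exact h
      refine List.pairwise_cons.mpr ⟨?_, ih hs.2 (fun z hz => hne z (by simp [hz]))⟩
      intro y hy
      rcases List.mem_cons.mp ((insortB_perm rest e).mem_iff.mp hy) with hy | hy
      · subst hy; exact hxe
      · exact hs.1 y hy

-- ---- delB on a sorted list containing the key is erase ----
theorem delB_eq_erase (xs : List (Int × Int × (Int × Int))) (key : Int × Int × (Int × Int))
    (hs : xs.Pairwise (fun a b => lexLtE a b = true)) (hmem : key ∈ xs) :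
    delB xs key = xs.erase key := by
  induction xs with
  | nil => cases hmem
  | cons x rest ih =>
    rw [List.pairwise_cons] at hs
    by_cases hx : x = key
    · subst hx
      simp [delB, lexLtE_irrefl, List.erase_cons_head]
    · have hkrest : key ∈ rest := by
        rcases List.mem_cons.mp hmem with h | h
        · exact absurd h.symm hx
        · exact h
      have hlt : lexLtE x key = true := hs.1 key hkrest
      rw [List.erase_cons_tail (by simpa using hx)]
      simp only [delB, hlt, if_true]
      rw [ih hs.2 hkrest]

-- ---- Python min(keys, key=...) picks the FIRST key with minimal value ----
theorem minFold_keep {α : Type} (k : α → Int) (suf : List α) (m : α)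
    (h : ∀ x ∈ suf, k m ≤ k x) :
    suf.foldl (fun acc x => match acc with
      | none => some x
      | some m => if k x < k m then some x else some m) (some m) = some m := by
  induction suf with
  | nil => rfl
  | cons x rest ih =>
    have hx : ¬ k x < k m := not_lt.mpr (h x (by simp))
    simp only [List.foldl_cons, hx, if_false]
    exact ih (fun z hz => h z (by simp [hz]))

theorem min?_first {α : Type} (k : α → Int) (pre : List α) (w : α) (suf : List α)
    (hpre : ∀ x ∈ pre, k w < k x) (hsuf : ∀ x ∈ suf, k w ≤ k x) :
    PySem.List.min? (pre ++ w :: suf) k = some w := by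
  have main : ∀ (pre : List α), (∀ x ∈ pre, k w < k x) →
      ∀ (acc : Option α), (acc = none ∨ ∃ m, acc = some m ∧ k w < k m) →
      (pre ++ w :: suf).foldl (fun acc x => match acc with
        | none => some x
        | some m => if k x < k m then some x else some m) acc = some w := by
    intro pre
    induction pre with
    | nil =>
      intro _ acc hacc
      rcases hacc with h | ⟨m, rfl, hm⟩
      · subst h
        simpa using minFold_keep k suf w hsuf
      · simp only [List.nil_append, List.foldl_cons, hm, if_true]
        exact minFold_keep k suf w hsuf
    | cons p ps ih =>
      intro hpre acc hacc
      simp only [List.cons_append, List.foldl_cons]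
      rcases hacc with h | ⟨m, rfl, hm⟩
      · subst h
        exact ih (fun z hz => hpre z (by simp [hz])) (some p)
          (Or.inr ⟨p, rfl, hpre p (by simp)⟩)
      · by_cases hc : k p < k m
        · simp only [hc, if_true]
          exact ih (fun z hz => hpre z (by simp [hz])) (some p)
            (Or.inr ⟨p, rfl, hpre p (by simp)⟩)
        · simp only [hc, if_false]
          exact ih (fun z hz => hpre z (by simp [hz])) (some m) (Or.inr ⟨m, rfl, hm⟩)
  exact main pre hpre none (Or.inl rfl)

theorem minD_first {α : Type} (k : α → Int) (pre : List α) (w : α) (suf : List α) (d : α)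
    (hpre : ∀ x ∈ pre, k w < k x) (hsuf : ∀ x ∈ suf, k w ≤ k x) :
    PySem.List.minD (pre ++ w :: suf) k d = w := by
  simp [PySem.List.minD, min?_first k pre w suf hpre hsuf]

-- ---- Dict.erase (items are the filtered items; lookups at other keys unchanged) ----
theorem dict_items_erase {ν : Type} (d : PySem.Dict (Int × Int) ν) (k : Int × Int) :
    (d.erase k).items = d.items.filter (fun p => !(p.1 == k)) := rfl

theorem dict_get?_erase {ν : Type} (d : PySem.Dict (Int × Int) ν) (k w : Int × Int) :
    (d.erase k).get? w = if w = k then none else d.get? w := by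
  by_cases hw : w = k
  · subst hw
    have hnone : List.find? (fun p => p.1 == w)
        (d.items.filter (fun p : (Int × Int) × ν => !(p.1 == w))) = none := by
      rw [List.find?_eq_none]
      intro x hx
      have := List.of_mem_filter hx
      simpa using this
    simp [PySem.Dict.get?, dict_items_erase, hnone]
  · simp only [if_neg hw, PySem.Dict.get?, dict_items_erase]
    congr 1
    induction d.items with
    | nil => rfl
    | cons p rest ih =>
      by_cases hp : (p.1 == k) = true
      · have hpw : (p.1 == w) = false := by
          rw [beq_eq_false_iff_ne]
          rw [beq_iff_eq] at hp
          subst hp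
          exact fun h => hw h.symm
        rw [List.filter_cons, if_neg (by simp [hp]), List.find?_cons, hpw]
        rw [ih]
      · rw [List.filter_cons, if_pos (by simp at hp ⊢; simp [hp])]
        rw [List.find?_cons, List.find?_cons]
        by_cases hpw : (p.1 == w) = true
        · simp [hpw]
        · simp only [Bool.not_eq_true] at hpw
          simp [hpw, ih]

theorem dict_contains_erase {ν : Type} (d : PySem.Dict (Int × Int) ν) (k w : Int × Int) :
    (d.erase k).contains w = if w = k then false else d.contains w := by
  rw [PySem.Dict.contains_eq_isSome_get?, PySem.Dict.contains_eq_isSome_get?, dict_get?_erase]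
  by_cases hw : w = k <;> simp [hw]

theorem dict_getD_erase_of_ne {ν : Type} (d : PySem.Dict (Int × Int) ν) (k w : Int × Int)
    (v : ν) (h : w ≠ k) : (d.erase k).getD w v = d.getD w v := by
  simp [PySem.Dict.getD, dict_get?_erase, h]

theorem dict_keys_erase {ν : Type} (d : PySem.Dict (Int × Int) ν) (k : Int × Int) :
    (d.erase k).keys = d.keys.filter (fun w => !(w == k)) := by
  simp [PySem.Dict.keys, dict_items_erase, List.filter_map]
  rfl

-- ---- the two grid enlargements agree on rectangular caves ----
theorem bumpB_eq : bumpB = bumpA := rfl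

-- proof-side canonical form of an enlarged row
def rowExt (row : List Int) : List Int :=
  row ++ (row.map (fun v => bumpA v 1) ++ (row.map (fun v => bumpA v 2) ++
    (row.map (fun v => bumpA v 3) ++ row.map (fun v => bumpA v 4))))

theorem block_read (row ext : List Int) (i : Int) :
    (PySem.List.pyRange 0 (row.length : Int) 1).map
      (fun c => bumpA (PySem.List.pyGetD (row ++ ext) c 0) i) = row.map (fun v => bumpA v i) := by
  apply List.ext_getElem
  · simp [PySem.List.length_pyRange_one]
  · intro k h1 h2
    have hk : k < row.length := by
      simpa [PySem.List.length_pyRange_one] using h1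
    simp only [List.getElem_map, PySem.List.getElem_pyRange_one, zero_add]
    rw [PySem.List.pyGetD_natCast]
    rw [List.getD_eq_getElem?_getD, List.getElem?_append_left hk]
    simp [List.getElem?_eq_getElem hk]

theorem block_read' (xs row : List Int) (i : Int) (h : row <+: xs) :
    (PySem.List.pyRange 0 (row.length : Int) 1).map
      (fun c => bumpA (PySem.List.pyGetD xs c 0) i) = row.map (fun v => bumpA v i) := by
  obtain ⟨ext, rfl⟩ := h
  exact block_read row ext i

theorem phase1_eq (cave : List (List Int)) (m0 : Nat) (h : ∀ row ∈ cave, row.length = m0) :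
    (PySem.List.pyRange 1 5 1).foldl (fun cv i =>
      cv.map (fun row => row ++ (PySem.List.pyRange 0 (m0 : Int) 1).map
        (fun c => bumpA (PySem.List.pyGetD row c 0) i))) cave = cave.map rowExt := by
  have h5 : PySem.List.pyRange 1 5 1 = [1, 2, 3, 4] := by decide
  rw [h5]
  simp only [List.foldl_cons, List.foldl_nil, List.map_map]
  apply List.map_congr_left
  intro row hrow
  have hl : row.length = m0 := h row hrow
  subst hl
  simp only [Function.comp_def]
  rw [block_read' row row 1 (by exact ⟨[], by simp⟩)]
  rw [block_read' _ row 2 ⟨_, rfl⟩]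
  rw [block_read' (row ++ List.map (fun v => bumpA v 1) row ++ List.map (fun v => bumpA v 2) row)
    row 3 ⟨List.map (fun v => bumpA v 1) row ++ List.map (fun v => bumpA v 2) row, by simp⟩]
  rw [block_read' (row ++ List.map (fun v => bumpA v 1) row ++ List.map (fun v => bumpA v 2) row
      ++ List.map (fun v => bumpA v 3) row) row 4
    ⟨List.map (fun v => bumpA v 1) row ++ List.map (fun v => bumpA v 2) row
      ++ List.map (fun v => bumpA v 3) row, by simp⟩]
  simp [rowExt]

theorem phase2_inner (base : List (List Int)) (f : List Int → List Int) :
    ∀ (k : Nat) (new : List (List Int)), k ≤ base.length →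
    (PySem.List.pyRange 0 (k : Int) 1).foldl
      (fun cv2 r => cv2 ++ [f (PySem.List.pyGetD cv2 r [])]) (base ++ new)
    = base ++ new ++ ((base.take k).map f) := by
  intro k
  induction k with
  | zero => intro new _; simp [PySem.List.pyRange_one_eq_nil]
  | succ k ih =>
    intro new hk
    have hsplit : PySem.List.pyRange 0 ((k + 1 : Nat) : Int) 1
        = PySem.List.pyRange 0 (k : Int) 1 ++ [(k : Int)] := by
      push_cast
      exact PySem.List.pyRange_one_succ_right (by positivity)
    rw [hsplit, List.foldl_append, ih new (by omega)]
    simp only [List.foldl_cons, List.foldl_nil]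
    have hkl : k < base.length := by omega
    have hget : PySem.List.pyGetD (base ++ new ++ (base.take k).map f) (k : Int) [] = base[k] := by
      rw [PySem.List.pyGetD_natCast, List.getD_eq_getElem?_getD, List.append_assoc,
        List.getElem?_append_left hkl]
      simp [List.getElem?_eq_getElem hkl]
    rw [hget]
    rw [List.take_add_one]
    simp only [List.getElem?_eq_getElem hkl, List.append_assoc, Option.toList_some]
    simp
    rw [List.take_add_one]
    simp [List.getElem?_eq_getElem (by simpa using hkl : k < (List.map f base).length)]

theorem phase2_inner' (cv base : List (List Int)) (f : List Int → List Int) (k : Nat)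
    (h : base <+: cv) (hk : k ≤ base.length) :
    (PySem.List.pyRange 0 (k : Int) 1).foldl
      (fun cv2 r => cv2 ++ [f (PySem.List.pyGetD cv2 r [])]) cv
    = cv ++ ((base.take k).map f) := by
  obtain ⟨new, rfl⟩ := h
  rw [phase2_inner base f k new hk]

def mapRow (i : Int) (r : List Int) : List Int := r.map (fun v => bumpA v i)

def enlCanon (cave : List (List Int)) : List (List Int) :=
  (cave.map rowExt) ++ ((cave.map rowExt).map (mapRow 1) ++ ((cave.map rowExt).map (mapRow 2)
    ++ ((cave.map rowExt).map (mapRow 3) ++ (cave.map rowExt).map (mapRow 4))))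

theorem rowExt_length (r : List Int) : (rowExt r).length = 5 * r.length := by
  simp [rowExt]; omega

theorem enlargeA_char (cave : List (List Int)) (hne : cave ≠ [])
    (h : ∀ row ∈ cave, row.length = (cave.headD []).length) :
    enlargeA cave = enlCanon cave := by
  obtain ⟨c0, rest, rfl⟩ : ∃ c0 rest, cave = c0 :: rest := by
    cases cave with
    | nil => exact absurd rfl hne
    | cons a l => exact ⟨a, l, rfl⟩
  simp only [enlargeA]
  rw [phase1_eq _ ((List.headD (c0 :: rest) []).length) h]
  -- the four appended row blocks
  have hbase : ∀ row' ∈ (c0 :: rest).map rowExt,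
      row'.length = ((((c0 :: rest).map rowExt).headD []).length) := by
    intro row' hrow'
    obtain ⟨r, hr, rfl⟩ := List.mem_map.mp hrow'
    simp only [List.map_cons, List.headD_cons, rowExt_length]
    rw [h r hr]
    simp
  have h5 : PySem.List.pyRange 1 5 1 = [1, 2, 3, 4] := by decide
  rw [h5]
  simp only [List.foldl_cons, List.foldl_nil]
  have hlen : ((c0 :: rest).length : Int) = (((c0 :: rest).map rowExt).length : Int) := by simp
  rw [hlen]
  have hstep : ∀ (i : Int) (cv : List (List Int)),
      ((c0 :: rest).map rowExt) <+: cv →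
      (PySem.List.pyRange 0 ((((c0 :: rest).map rowExt).length : Nat) : Int) 1).foldl
        (fun cv2 r => cv2 ++ [(PySem.List.pyRange 0
            (((((c0 :: rest).map rowExt).headD []).length : Nat) : Int) 1).map
          (fun c => bumpA (PySem.List.pyGetD (PySem.List.pyGetD cv2 r []) c 0) i)]) cv
      = cv ++ ((c0 :: rest).map rowExt).map (mapRow i) := by
    intro i cv hpre
    have h2 := phase2_inner' cv ((c0 :: rest).map rowExt)
      (fun row' => (PySem.List.pyRange 0
          (((((c0 :: rest).map rowExt).headD []).length : Nat) : Int) 1).map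
        (fun c => bumpA (PySem.List.pyGetD row' c 0) i))
      (((c0 :: rest).map rowExt).length) hpre (le_refl _)
    rw [List.take_length] at h2
    beta_reduce at h2
    rw [h2]
    congr 1
    apply List.map_congr_left
    intro row' hrow'
    have := hbase row' hrow'
    rw [show ((((c0 :: rest).map rowExt).headD []).length : Int) = ((row'.length : Nat) : Int) by
      rw [this]]
    exact block_read' row' row' i (List.prefix_refl _)
  rw [hstep 1 _ (List.prefix_refl _)]
  rw [hstep 2 _ (List.prefix_append _ _)]
  rw [hstep 3 _ ((List.prefix_append _ _).trans (List.prefix_append _ _))]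
  rw [hstep 4 _ (((List.prefix_append _ _).trans (List.prefix_append _ _)).trans
    (List.prefix_append _ _))]
  simp [enlCanon, List.append_assoc]

theorem enlargeB_char (cave : List (List Int)) : enlargeB cave = enlCanon cave := by
  have h5 : PySem.List.pyRange 0 5 1 = [0, 1, 2, 3, 4] := by decide
  simp [enlargeB, h5, List.flatMap_cons, cellB, bumpB_eq, enlCanon, mapRow, rowExt,
    List.map_map, Function.comp_def]

theorem enlarge_eq (cave : List (List Int)) (hne : cave ≠ [])
    (h : ∀ row ∈ cave, row.length = (cave.headD []).length) :
    enlargeA cave = enlargeB cave := by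
  rw [enlargeA_char cave hne h, enlargeB_char cave]

-- ---- the bisimulation invariant between A's and B's loop states ----
-- (at a loop head with current vertex c: S already contains c on the B side)
structure MidInv (n m : Int) (E : PySem.Dict (Int × Int) ((Int × Int) × Int))
    (S : PySem.Set (Int × Int)) (R : PySem.Dict (Int × Int) ((Int × Int) × Int))
    (ent : PySem.Dict (Int × Int) (Int × Int)) (F : List (Int × Int × (Int × Int)))
    (cnt : Int) : Prop where
  hES : ∀ w, E.contains w = S.contains w
  hkeys : ∀ w, ent.contains w = R.contains w
  hval : ∀ w pr, R.get? w = some pr → (ent.getD w (0, 0)).1 = pr.2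
  hperm : F.Perm (R.items.map (fun wp => (wp.2.2, (ent.getD wp.1 (0, 0)).2, wp.1)))
  hsort : F.Pairwise (fun a b => lexLtE a b = true)
  hrank : (R.items.map (fun wp => (ent.getD wp.1 (0, 0)).2)).Pairwise (· < ·)
  hcnt : ∀ w, ent.contains w = true → (ent.getD w (0, 0)).2 < cnt
  hndR : R.keys.Nodup
  hgrid : ∀ w, R.contains w = true → 0 ≤ w.1 ∧ w.1 < m ∧ 0 ≤ w.2 ∧ w.2 < n
  hRE : ∀ w, R.contains w = true → E.contains w = false

-- A's single-neighbour update, as a named function (definitionally what findReachableA does)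
def stepA (grid : List (List Int)) (E R : PySem.Dict (Int × Int) ((Int × Int) × Int))
    (cx cy dc px py : Int) (cond : Prop) [Decidable cond] :
    PySem.Dict (Int × Int) ((Int × Int) × Int) :=
  if cond ∧ E.contains (px, py) = false ∧
      (R.contains (px, py) = false ∨ (R.getD (px, py) ((0, 0), 0)).2 >
        PySem.List.pyGetD (PySem.List.pyGetD grid py []) px 0 + dc)
    then R.insert (px, py) ((cx, cy), PySem.List.pyGetD (PySem.List.pyGetD grid py []) px 0 + dc)
    else R

theorem relax_step (grid : List (List Int)) (n m : Int)
    (E : PySem.Dict (Int × Int) ((Int × Int) × Int)) (S : PySem.Set (Int × Int))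
    (R : PySem.Dict (Int × Int) ((Int × Int) × Int)) (ent : PySem.Dict (Int × Int) (Int × Int))
    (F : List (Int × Int × (Int × Int))) (cnt : Int) (cx cy dc px py : Int)
    (cond : Prop) [Decidable cond]
    (hcond : cond ↔ (0 ≤ px ∧ px < m ∧ 0 ≤ py ∧ py < n))
    (hInv : MidInv n m E S R ent F cnt)
    (F' : List (Int × Int × (Int × Int))) (ent' : PySem.Dict (Int × Int) (Int × Int)) (cnt' : Int)
    (hB : relaxB grid n m S dc (F, ent, cnt) (px, py) = (F', ent', cnt')) :
    MidInv n m E S (stepA grid E R cx cy dc px py cond) ent' F' cnt' := by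
  unfold stepA
  by_cases hb : (0 ≤ px ∧ px < m ∧ 0 ≤ py ∧ py < n ∧ S.contains (px, py) = false)
  case neg =>
    -- neither side changes anything
    have hBfix : (F', ent', cnt') = (F, ent, cnt) := by
      rw [← hB]; simp only [relaxB]; rw [if_neg]
      intro hcontr
      exact hb ⟨hcontr.1, hcontr.2.1, hcontr.2.2.1, hcontr.2.2.2⟩
    simp only [Prod.mk.injEq] at hBfix
    obtain ⟨rfl, rfl, rfl⟩ := hBfix
    rw [if_neg]
    · exact hInv
    · intro hcontr
      obtain ⟨hcnd, hE, _⟩ := hcontr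
      have hbnd := hcond.mp hcnd
      apply hb
      refine ⟨hbnd.1, hbnd.2.1, hbnd.2.2.1, hbnd.2.2.2, ?_⟩
      rw [← hInv.hES]; exact hE
  case pos =>
    obtain ⟨hx0, hxm, hy0, hyn, hSc⟩ := hb
    have hEc : E.contains (px, py) = false := by rw [hInv.hES]; exact hSc
    have hcnd : cond := hcond.mpr ⟨hx0, hxm, hy0, hyn⟩
    simp only [relaxB, if_pos (⟨hx0, hxm, hy0, hyn, hSc⟩ :
      0 ≤ px ∧ px < m ∧ 0 ≤ py ∧ py < n ∧ S.contains (px, py) = false)] at hB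
    set v : Int := PySem.List.pyGetD (PySem.List.pyGetD grid py []) px 0 with hv
    by_cases hc : ent.contains (px, py) = false
    · -- new frontier vertex
      have hRc : R.contains (px, py) = false := by rw [← hInv.hkeys]; exact hc
      rw [if_pos ⟨hcnd, hEc, Or.inl hRc⟩]
      rw [if_pos hc] at hB
      simp only [Prod.mk.injEq] at hB
      obtain ⟨hF, hent, hcnt'⟩ := hB
      subst hF hent hcnt'
      have hitems : (R.insert (px, py) ((cx, cy), v + dc)).items
          = R.items ++ [((px, py), ((cx, cy), v + dc))] :=
        PySem.Dict.items_insert_of_not_contains _ _ hRc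
      have hfresh : ∀ wp ∈ R.items, wp.1 ≠ (px, py) := by
        intro wp hwp heq
        have : R.contains (px, py) = true := by
          rw [PySem.Dict.contains_iff_mem_keys]
          exact heq ▸ List.mem_map_of_mem hwp
        simp [this] at hRc
      have hmapc : R.items.map (fun wp =>
            (wp.2.2, ((ent.insert (px, py) (dc + v, cnt)).getD wp.1 (0, 0)).2, wp.1))
          = R.items.map (fun wp => (wp.2.2, (ent.getD wp.1 (0, 0)).2, wp.1)) := by
        apply List.map_congr_left
        intro wp hwp
        rw [PySem.Dict.getD_insert_of_ne _ _ _ (hfresh wp hwp)]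
      have hmapr : R.items.map (fun wp =>
            ((ent.insert (px, py) (dc + v, cnt)).getD wp.1 (0, 0)).2)
          = R.items.map (fun wp => (ent.getD wp.1 (0, 0)).2) := by
        apply List.map_congr_left
        intro wp hwp
        rw [PySem.Dict.getD_insert_of_ne _ _ _ (hfresh wp hwp)]
      have hranklt : ∀ wp ∈ R.items, (ent.getD wp.1 (0, 0)).2 < cnt := by
        intro wp hwp
        apply hInv.hcnt
        rw [hInv.hkeys, PySem.Dict.contains_iff_mem_keys]
        exact List.mem_map_of_mem hwp
      refine ⟨hInv.hES, ?_, ?_, ?_, ?_, ?_, ?_, ?_, ?_, ?_⟩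
      · -- hkeys
        intro w
        rw [PySem.Dict.contains_insert, PySem.Dict.contains_insert, hInv.hkeys]
      · -- hval
        intro w pr hpr
        by_cases hw : w = (px, py)
        · subst hw
          rw [PySem.Dict.get?_insert_self] at hpr
          injection hpr with h
          rw [PySem.Dict.getD_insert_self, ← h]
          exact (add_comm dc v)
        · rw [PySem.Dict.get?_insert_of_ne _ _ hw] at hpr
          rw [PySem.Dict.getD_insert_of_ne _ _ _ hw]
          exact hInv.hval w pr hpr
      · -- hperm
        rw [hitems, List.map_append, hmapc]
        refine (insortB_perm F (dc + v, cnt, (px, py))).trans ?_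
        have : ((px, py), ((cx, cy), v + dc)).2.2 = dc + v := by
          simp [add_comm]
        simp only [List.map_cons, List.map_nil, PySem.Dict.getD_insert_self]
        refine List.Perm.trans ?_ (List.perm_append_singleton _ _).symm
        rw [add_comm dc v]
        exact (hInv.hperm.cons _)
      · -- hsort
        apply insortB_pairwise _ _ hInv.hsort
        intro x hx heq
        have hx2 := hInv.hperm.mem_iff.mp hx
        obtain ⟨wp, hwp, rfl⟩ := List.mem_map.mp hx2
        have hlt := hranklt wp hwp
        simp only [Prod.mk.injEq] at heq
        obtain ⟨-, h2, -⟩ := heq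
        omega
      · -- hrank
        rw [hitems, List.map_append, hmapr]
        rw [List.pairwise_append]
        refine ⟨hInv.hrank, by simp, ?_⟩
        intro a ha b hb
        simp only [List.map_cons, List.map_nil, List.mem_singleton] at hb
        rw [hb, PySem.Dict.getD_insert_self]
        obtain ⟨wp, hwp, rfl⟩ := List.mem_map.mp ha
        exact hranklt wp hwp
      · -- hcnt
        intro w hw
        by_cases hwp : w = (px, py)
        · subst hwp
          rw [PySem.Dict.getD_insert_self]
          omega
        · rw [PySem.Dict.getD_insert_of_ne _ _ _ hwp]
          rw [PySem.Dict.contains_insert] at hw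
          have : ent.contains w = true := by
            rcases Bool.or_eq_true_iff.mp hw with h | h
            · exact absurd (by simpa using h) hwp
            · exact h
          have := hInv.hcnt w this
          omega
      · -- hndR
        rw [PySem.Dict.keys_insert_of_not_contains _ _ hRc]
        have hpk : (px, py) ∉ R.keys := by
          intro hmem
          rw [← PySem.Dict.contains_iff_mem_keys] at hmem
          simp [hmem] at hRc
        refine List.Nodup.append hInv.hndR (List.nodup_singleton _) ?_
        intro a ha hmem
        rw [List.mem_singleton] at hmem
        exact hpk (hmem ▸ ha)
      · -- hgrid
        intro w hw
        rw [PySem.Dict.contains_insert] at hw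
        rcases Bool.or_eq_true_iff.mp hw with h | h
        · have : w = (px, py) := by simpa using h
          subst this
          exact ⟨hx0, hxm, hy0, hyn⟩
        · exact hInv.hgrid w h
      · -- hRE
        intro w hw
        rw [PySem.Dict.contains_insert] at hw
        rcases Bool.or_eq_true_iff.mp hw with h | h
        · have : w = (px, py) := by simpa using h
          subst this
          exact hEc
        · exact hInv.hRE w h
    · -- vertex already in the frontier
      have hc' : ent.contains (px, py) = true := by simpa using hc
      have hRc : R.contains (px, py) = true := by rw [← hInv.hkeys]; exact hc'
      obtain ⟨pr, hpr⟩ : ∃ pr, R.get? (px, py) = some pr := by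
        have h := PySem.Dict.contains_eq_isSome_get? R (px, py)
        rw [hRc] at h
        exact Option.isSome_iff_exists.mp h.symm
      have hod : (ent.getD (px, py) (0, 0)).1 = pr.2 := hInv.hval _ _ hpr
      have hgetD : R.getD (px, py) ((0, 0), 0) = pr := PySem.Dict.getD_of_get?_eq_some _ _ hpr
      rw [if_neg hc] at hB
      have hmemI : ((px, py), pr) ∈ R.items := PySem.Dict.mem_items_of_get?_eq_some _ hpr
      by_cases hlt : dc + v < (ent.getD (px, py) (0, 0)).1
      · -- strictly better path: decrease-key
        rw [if_pos hlt] at hB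
        simp only [Prod.mk.injEq] at hB
        obtain ⟨hF, hent, hcnt'⟩ := hB
        subst hF hent hcnt'
        rw [if_pos ⟨hcnd, hEc, Or.inr (by rw [hgetD]; omega)⟩]
        obtain ⟨l1, l2, hsplit⟩ := List.append_of_mem hmemI
        have hkeys_split : R.keys = l1.map (·.1) ++ (px, py) :: l2.map (·.1) := by
          show R.items.map (·.1) = _
          rw [hsplit]
          simp
        have hnd := hInv.hndR
        rw [hkeys_split] at hnd
        have hq1 : ∀ q ∈ l1, q.1 ≠ (px, py) := by
          intro q hq heq
          have h1 := (List.nodup_append.mp hnd).2.2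
          exact h1 q.1 (List.mem_map_of_mem hq) (px, py) (by simp) heq
        have hq2 : ∀ q ∈ l2, q.1 ≠ (px, py) := by
          intro q hq heq
          have h1 := (List.nodup_append.mp hnd).2.1
          rw [List.nodup_cons] at h1
          exact h1.1 (heq ▸ List.mem_map_of_mem hq)
        have hitems : (R.insert (px, py) ((cx, cy), v + dc)).items
            = l1 ++ ((px, py), ((cx, cy), v + dc)) :: l2 := by
          rw [PySem.Dict.items_insert_of_contains _ _ hRc, hsplit]
          rw [List.map_append, List.map_cons]
          congr 1
          · conv_rhs => rw [← List.map_id l1]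
            apply List.map_congr_left
            intro q hq
            rw [if_neg (by simpa using hq1 q hq)]
            rfl
          · rw [if_pos (by simp)]
            congr 1
            conv_rhs => rw [← List.map_id l2]
            apply List.map_congr_left
            intro q hq
            rw [if_neg (by simpa using hq2 q hq)]
            rfl
        -- B's old frontier entry is exactly the image of the old item
        set ot : Int := (ent.getD (px, py) (0, 0)).2 with hot
        have hOldEnt : ((ent.getD (px, py) (0, 0)).1, ot, (px, py))
            = (pr.2, (ent.getD (px, py) (0, 0)).2, (px, py)) := by rw [hod]
        have hmapsplit : R.items.map (fun wp => (wp.2.2, (ent.getD wp.1 (0, 0)).2, wp.1))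
            = l1.map (fun wp => (wp.2.2, (ent.getD wp.1 (0, 0)).2, wp.1))
              ++ (pr.2, ot, (px, py)) :: l2.map (fun wp => (wp.2.2, (ent.getD wp.1 (0, 0)).2, wp.1)) := by
          rw [hsplit]; simp; rfl
        have hOldMemF : ((ent.getD (px, py) (0, 0)).1, ot, (px, py)) ∈ F := by
          rw [hod]
          apply hInv.hperm.mem_iff.mpr
          rw [hmapsplit]
          exact List.mem_append_right _ (List.mem_cons_self)
        have hdel : delB F ((ent.getD (px, py) (0, 0)).1, ot, (px, py))
            = F.erase ((ent.getD (px, py) (0, 0)).1, ot, (px, py)) :=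
          delB_eq_erase F _ hInv.hsort hOldMemF
        have hmapc1 : ∀ (l : List ((Int × Int) × ((Int × Int) × Int))), (∀ q ∈ l, q.1 ≠ (px, py)) →
            l.map (fun wp => (wp.2.2, ((ent.insert (px, py) (dc + v, ot)).getD wp.1 (0, 0)).2, wp.1))
            = l.map (fun wp => (wp.2.2, (ent.getD wp.1 (0, 0)).2, wp.1)) := by
          intro l hl
          apply List.map_congr_left
          intro q hq
          rw [PySem.Dict.getD_insert_of_ne _ _ _ (hl q hq)]
        have herase : (l1.map (fun wp => (wp.2.2, (ent.getD wp.1 (0, 0)).2, wp.1))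
              ++ (pr.2, ot, (px, py)) :: l2.map (fun wp => (wp.2.2, (ent.getD wp.1 (0, 0)).2, wp.1))).erase
              (pr.2, ot, (px, py))
            = l1.map (fun wp => (wp.2.2, (ent.getD wp.1 (0, 0)).2, wp.1))
              ++ l2.map (fun wp => (wp.2.2, (ent.getD wp.1 (0, 0)).2, wp.1)) := by
          rw [List.erase_append_right, List.erase_cons_head]
          intro hmem
          obtain ⟨q, hq, heq⟩ := List.mem_map.mp hmem
          have : q.1 = (px, py) := congrArg (fun e => e.2.2) heq
          exact hq1 q hq this
        refine ⟨hInv.hES, ?_, ?_, ?_, ?_, ?_, ?_, ?_, ?_, ?_⟩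
        · intro w
          rw [PySem.Dict.contains_insert, PySem.Dict.contains_insert, hInv.hkeys]
        · intro w pw hpw
          by_cases hw : w = (px, py)
          · subst hw
            rw [PySem.Dict.get?_insert_self] at hpw
            injection hpw with h
            rw [PySem.Dict.getD_insert_self, ← h]
            exact (add_comm dc v)
          · rw [PySem.Dict.get?_insert_of_ne _ _ hw] at hpw
            rw [PySem.Dict.getD_insert_of_ne _ _ _ hw]
            exact hInv.hval w pw hpw
        · -- hperm
          rw [hitems, List.map_append, List.map_cons, hmapc1 l1 hq1, hmapc1 l2 hq2]
          simp only [PySem.Dict.getD_insert_self]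
          refine (insortB_perm _ _).trans ?_
          rw [hdel]
          have h1 : (F.erase ((ent.getD (px, py) (0, 0)).1, ot, (px, py))).Perm
              (l1.map (fun wp => (wp.2.2, (ent.getD wp.1 (0, 0)).2, wp.1))
                ++ l2.map (fun wp => (wp.2.2, (ent.getD wp.1 (0, 0)).2, wp.1))) := by
            rw [hOldEnt]
            refine (hInv.hperm.erase _).trans ?_
            rw [hmapsplit, herase]
          have h2 := h1.cons (dc + v, ot, (px, py))
          refine h2.trans ?_
          rw [show (dc + v : Int) = v + dc from add_comm dc v]
          exact List.perm_middle.symm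
        · -- hsort
          rw [hdel]
          apply insortB_pairwise _ _ (hInv.hsort.sublist List.erase_sublist)
          -- no remaining entry equals the new one
          have hFnd : F.Nodup := by
            refine (hInv.hperm.nodup_iff).mpr ?_
            refine List.Nodup.of_map (fun e => e.2.2) ?_
            rw [List.map_map]
            exact hInv.hndR
          intro x hx heq
          have hxF := List.mem_of_mem_erase hx
          obtain ⟨wp, hwp, hwpe⟩ := List.mem_map.mp (hInv.hperm.mem_iff.mp hxF)
          rw [heq] at hwpe
          simp only [Prod.mk.injEq] at hwpe
          obtain ⟨h1, h2, h3⟩ := hwpe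
          have hwp_eq : wp = ((px, py), pr) :=
            List.inj_on_of_nodup_map (f := fun q : (Int × Int) × ((Int × Int) × Int) => q.1)
              hInv.hndR hwp hmemI (by simpa using h3)
          have h1' : pr.2 = dc + v := by rw [hwp_eq] at h1; exact h1
          omega
        · -- hrank
          have : (R.insert (px, py) ((cx, cy), v + dc)).items.map
              (fun wp => ((ent.insert (px, py) (dc + v, ot)).getD wp.1 (0, 0)).2)
              = R.items.map (fun wp => (ent.getD wp.1 (0, 0)).2) := by
            rw [hitems, hsplit]
            simp only [List.map_append, List.map_cons]
            congr 1
            · apply List.map_congr_left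
              intro q hq
              rw [PySem.Dict.getD_insert_of_ne _ _ _ (hq1 q hq)]
            · congr 1
              · rw [PySem.Dict.getD_insert_self]
              · apply List.map_congr_left
                intro q hq
                rw [PySem.Dict.getD_insert_of_ne _ _ _ (hq2 q hq)]
          rw [this]
          exact hInv.hrank
        · -- hcnt
          intro w hw
          by_cases hwp : w = (px, py)
          · subst hwp
            rw [PySem.Dict.getD_insert_self]
            exact hInv.hcnt _ hc'
          · rw [PySem.Dict.getD_insert_of_ne _ _ _ hwp]
            rw [PySem.Dict.contains_insert] at hw
            rcases Bool.or_eq_true_iff.mp hw with h | h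
            · exact absurd (by simpa using h) hwp
            · exact hInv.hcnt w h
        · -- hndR
          rw [PySem.Dict.keys_insert_of_contains _ _ hRc]
          exact hInv.hndR
        · -- hgrid
          intro w hw
          rw [PySem.Dict.contains_insert] at hw
          rcases Bool.or_eq_true_iff.mp hw with h | h
          · have : w = (px, py) := by simpa using h
            subst this
            exact ⟨hx0, hxm, hy0, hyn⟩
          · exact hInv.hgrid w h
        · -- hRE
          intro w hw
          rw [PySem.Dict.contains_insert] at hw
          rcases Bool.or_eq_true_iff.mp hw with h | h
          · have : w = (px, py) := by simpa using h
            subst this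
            exact hEc
          · exact hInv.hRE w h
      · -- not an improvement: both sides unchanged
        rw [if_neg hlt] at hB
        simp only [Prod.mk.injEq] at hB
        obtain ⟨rfl, rfl, rfl⟩ := hB
        rw [if_neg]
        · exact hInv
        · intro hcontr
          rcases hcontr.2.2 with h | h
          · rw [hRc] at h; cases h
          · rw [hgetD] at h
            omega

theorem bool_eq_of_iff {a b : Bool} (h : a = true ↔ b = true) : a = b := by
  cases a <;> cases b <;> simp_all

theorem lexLt_fst_le {a b : Int × Int × (Int × Int)} (h : lexLtE a b = true) : a.1 ≤ b.1 := by
  obtain ⟨a1, a2, a3, a4⟩ := a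
  obtain ⟨b1, b2, b3, b4⟩ := b
  simp only [lexLtE, Bool.or_eq_true, Bool.and_eq_true, beq_iff_eq, decide_eq_true_eq] at h
  omega

theorem lexLt_fst_lt_of_rank_gt {a b : Int × Int × (Int × Int)} (h : lexLtE a b = true)
    (hr : b.2.1 < a.2.1) : a.1 < b.1 := by
  obtain ⟨a1, a2, a3, a4⟩ := a
  obtain ⟨b1, b2, b3, b4⟩ := b
  simp only [lexLtE, Bool.or_eq_true, Bool.and_eq_true, beq_iff_eq, decide_eq_true_eq] at h
  simp only at hr
  omega

theorem pop_step (n m : Int) (E R : PySem.Dict (Int × Int) ((Int × Int) × Int))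
    (ent : PySem.Dict (Int × Int) (Int × Int)) (cnt : Int) (S' : PySem.Set (Int × Int))
    (F : List (Int × Int × (Int × Int))) (hInv : MidInv n m E S' R ent F cnt) :
    (R.size = 0 ↔ F = []) ∧
    ∀ d' t' w' fr, F = (d', t', w') :: fr →
      PySem.List.minD R.keys (fun k => (R.getD k ((0, 0), 0)).2) (0, 0) = w' ∧
      (R.getD w' ((0, 0), 0)).2 = d' ∧
      MidInv n m (E.insert w' (R.getD w' ((0, 0), 0))) (S'.add w') (R.erase w')
        (ent.erase w') fr cnt ∧
      S'.contains w' = false ∧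
      (0 ≤ w'.1 ∧ w'.1 < m ∧ 0 ≤ w'.2 ∧ w'.2 < n) := by
  have hlen : F.length = R.items.length := by
    have := hInv.hperm.length_eq
    simpa using this
  constructor
  · constructor
    · intro h
      have : R.items.length = 0 := h
      rw [← List.length_eq_zero_iff, hlen, this]
    · intro h
      show R.items.length = 0
      rw [← hlen, h]
      rfl
  · intro d' t' w' fr hF
    have heF : ((d', t', w') : Int × Int × (Int × Int)) ∈ F := by rw [hF]; exact List.mem_cons_self
    obtain ⟨wp, hwpI, hwpe⟩ := List.mem_map.mp (hInv.hperm.mem_iff.mp heF)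
    obtain ⟨wk, pw⟩ := wp
    simp only [Prod.mk.injEq] at hwpe
    obtain ⟨hd', ht', hw'⟩ := hwpe
    subst hw'
    have hmemI : (wk, pw) ∈ R.items := hwpI
    have hgetDw : R.getD wk ((0, 0), 0) = pw :=
      PySem.Dict.getD_of_mem_items _ hmemI hInv.hndR _
    have hRcw : R.contains wk = true := by
      rw [PySem.Dict.contains_iff_mem_keys]
      exact List.mem_map_of_mem hmemI
    -- split the items at wk
    obtain ⟨l1, l2, hsplit⟩ := List.append_of_mem hmemI
    have hkeys_split : R.keys = l1.map (·.1) ++ wk :: l2.map (·.1) := by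
      show R.items.map (·.1) = _
      rw [hsplit]
      simp
    have hnd := hInv.hndR
    rw [hkeys_split] at hnd
    have hq1 : ∀ q ∈ l1, q.1 ≠ wk := by
      intro q hq heq
      have h1 := (List.nodup_append.mp hnd).2.2
      exact h1 q.1 (List.mem_map_of_mem hq) wk (by simp) heq
    have hq2 : ∀ q ∈ l2, q.1 ≠ wk := by
      intro q hq heq
      have h1 := (List.nodup_append.mp hnd).2.1
      rw [List.nodup_cons] at h1
      exact h1.1 (heq ▸ List.mem_map_of_mem hq)
    have hmapsplit : R.items.map (fun q => (q.2.2, (ent.getD q.1 (0, 0)).2, q.1))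
        = l1.map (fun q => (q.2.2, (ent.getD q.1 (0, 0)).2, q.1))
          ++ (d', t', wk) :: l2.map (fun q => (q.2.2, (ent.getD q.1 (0, 0)).2, q.1)) := by
      rw [hsplit]
      simp only [List.map_append, List.map_cons]
      rw [hd', ht']
    have hfr : fr.Perm (l1.map (fun q => (q.2.2, (ent.getD q.1 (0, 0)).2, q.1))
        ++ l2.map (fun q => (q.2.2, (ent.getD q.1 (0, 0)).2, q.1))) := by
      have h1 : ((d', t', wk) :: fr).Perm (R.items.map (fun q => (q.2.2, (ent.getD q.1 (0, 0)).2, q.1))) := by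
        rw [← hF]; exact hInv.hperm
      rw [hmapsplit] at h1
      have h2 := h1.trans List.perm_middle
      exact h2.cons_inv
    have hheadlt : ∀ b ∈ fr, lexLtE (d', t', wk) b = true := by
      have := hInv.hsort
      rw [hF, List.pairwise_cons] at this
      exact this.1
    have hranks := hInv.hrank
    rw [hsplit] at hranks
    simp only [List.map_append, List.map_cons] at hranks
    rw [List.pairwise_append] at hranks
    have hmin : PySem.List.minD R.keys (fun k => (R.getD k ((0, 0), 0)).2) (0, 0) = wk := by
      rw [hkeys_split]
      apply minD_first
      · intro x hx
        obtain ⟨q, hq, rfl⟩ := List.mem_map.mp hx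
        have hqI : q ∈ R.items := by rw [hsplit]; exact List.mem_append_left _ hq
        have hkq : R.getD q.1 ((0, 0), 0) = q.2 := by
          obtain ⟨qk, qv⟩ := q
          exact PySem.Dict.getD_of_mem_items _ hqI hInv.hndR _
        rw [hgetDw, hkq]
        have hent : (q.2.2, (ent.getD q.1 (0, 0)).2, q.1) ∈ fr := by
          apply hfr.mem_iff.mpr
          exact List.mem_append_left _ (List.mem_map_of_mem hq)
        have hlex := hheadlt _ hent
        have hrk : (ent.getD q.1 (0, 0)).2 < t' := by
          have h6 := hranks.2.2 _ (List.mem_map_of_mem hq) (ent.getD wk (0, 0)).2 (by simp)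
          rw [ht'] at h6
          exact h6
        have h5 := lexLt_fst_lt_of_rank_gt hlex (by simpa using hrk)
        rw [hd']
        simpa using h5
      · intro x hx
        obtain ⟨q, hq, rfl⟩ := List.mem_map.mp hx
        have hqI : q ∈ R.items := by
          rw [hsplit]; exact List.mem_append_right _ (List.mem_cons_of_mem _ hq)
        have hkq : R.getD q.1 ((0, 0), 0) = q.2 := by
          obtain ⟨qk, qv⟩ := q
          exact PySem.Dict.getD_of_mem_items _ hqI hInv.hndR _
        rw [hgetDw, hkq]
        have hent : (q.2.2, (ent.getD q.1 (0, 0)).2, q.1) ∈ fr := by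
          apply hfr.mem_iff.mpr
          exact List.mem_append_right _ (List.mem_map_of_mem hq)
        have hlex := hheadlt _ hent
        have h5 := lexLt_fst_le hlex
        rw [hd']
        simpa using h5
    have hd2 : (R.getD wk ((0, 0), 0)).2 = d' := by rw [hgetDw, hd']
    have hEw : E.contains wk = false := hInv.hRE wk hRcw
    have hSw : S'.contains wk = false := by rw [← hInv.hES]; exact hEw
    have hitems' : (R.erase wk).items = l1 ++ l2 := by
      rw [dict_items_erase, hsplit, List.filter_append, List.filter_cons]
      rw [if_neg (by simp)]
      congr 1
      · apply List.filter_eq_self.mpr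
        intro q hq
        simpa using hq1 q hq
      · apply List.filter_eq_self.mpr
        intro q hq
        simpa using hq2 q hq
    refine ⟨hmin, hd2, ?_, hSw, hInv.hgrid wk hRcw⟩
    refine ⟨?_, ?_, ?_, ?_, ?_, ?_, ?_, ?_, ?_, ?_⟩
    · -- hES
      intro w
      apply bool_eq_of_iff
      rw [PySem.Dict.contains_insert, PySem.Set.contains_iff, PySem.Set.mem_add,
        Bool.or_eq_true, beq_iff_eq, ← PySem.Set.contains_iff, hInv.hES]
      tauto
    · -- hkeys
      intro w
      rw [dict_contains_erase, dict_contains_erase]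
      by_cases hw : w = wk <;> simp [hw, hInv.hkeys]
    · -- hval
      intro w pv hpv
      rw [dict_get?_erase] at hpv
      by_cases hw : w = wk
      · simp [hw] at hpv
      · rw [if_neg hw] at hpv
        rw [dict_getD_erase_of_ne _ _ _ _ hw]
        exact hInv.hval w pv hpv
    · -- hperm
      rw [hitems', List.map_append]
      have hc1 : l1.map (fun q => (q.2.2, ((ent.erase wk).getD q.1 (0, 0)).2, q.1))
          = l1.map (fun q => (q.2.2, (ent.getD q.1 (0, 0)).2, q.1)) := by
        apply List.map_congr_left
        intro q hq
        rw [dict_getD_erase_of_ne _ _ _ _ (hq1 q hq)]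
      have hc2 : l2.map (fun q => (q.2.2, ((ent.erase wk).getD q.1 (0, 0)).2, q.1))
          = l2.map (fun q => (q.2.2, (ent.getD q.1 (0, 0)).2, q.1)) := by
        apply List.map_congr_left
        intro q hq
        rw [dict_getD_erase_of_ne _ _ _ _ (hq2 q hq)]
      rw [hc1, hc2]
      exact hfr
    · -- hsort
      have := hInv.hsort
      rw [hF, List.pairwise_cons] at this
      exact this.2
    · -- hrank
      rw [hitems', List.map_append]
      have hc1 : l1.map (fun q => ((ent.erase wk).getD q.1 (0, 0)).2)
          = l1.map (fun q => (ent.getD q.1 (0, 0)).2) := by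
        apply List.map_congr_left
        intro q hq
        rw [dict_getD_erase_of_ne _ _ _ _ (hq1 q hq)]
      have hc2 : l2.map (fun q => ((ent.erase wk).getD q.1 (0, 0)).2)
          = l2.map (fun q => (ent.getD q.1 (0, 0)).2) := by
        apply List.map_congr_left
        intro q hq
        rw [dict_getD_erase_of_ne _ _ _ _ (hq2 q hq)]
      rw [hc1, hc2]
      rw [List.pairwise_append]
      refine ⟨hranks.1, (List.pairwise_cons.mp hranks.2.1).2, ?_⟩
      intro a ha b hb
      exact hranks.2.2 a ha b (List.mem_cons_of_mem _ hb)
    · -- hcnt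
      intro w hw
      rw [dict_contains_erase] at hw
      by_cases hww : w = wk
      · rw [if_pos hww] at hw; cases hw
      · rw [if_neg hww] at hw
        rw [dict_getD_erase_of_ne _ _ _ _ hww]
        exact hInv.hcnt w hw
    · -- hndR
      rw [dict_keys_erase]
      exact hInv.hndR.filter _
    · -- hgrid
      intro w hw
      rw [dict_contains_erase] at hw
      by_cases hww : w = wk
      · rw [if_pos hww] at hw; cases hw
      · rw [if_neg hww] at hw
        exact hInv.hgrid w hw
    · -- hRE
      intro w hw
      rw [dict_contains_erase] at hw
      by_cases hww : w = wk
      · rw [if_pos hww] at hw; cases hw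
      · rw [if_neg hww] at hw
        rw [PySem.Dict.contains_insert]
        have h1 := hInv.hRE w hw
        have h2 : (w == wk) = false := by simpa using hww
        rw [h1, h2]
        rfl


theorem findReachableA_eq (grid : List (List Int)) (n m : Int)
    (E R : PySem.Dict (Int × Int) ((Int × Int) × Int)) (cx cy dc : Int) :
    findReachableA grid n m E R (cx, cy) dc =
      stepA grid E (stepA grid E (stepA grid E (stepA grid E R cx cy dc (cx-1) cy (cx > 0))
        cx cy dc (cx+1) cy (cx < m - 1)) cx cy dc cx (cy-1) (cy > 0))
        cx cy dc cx (cy+1) (cy < n - 1) := rfl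

theorem loop_eq (grid : List (List Int)) (n m : Int) :
    ∀ (fuel : Nat) (cx cy dc : Int) (E R : PySem.Dict (Int × Int) ((Int × Int) × Int))
      (S : PySem.Set (Int × Int)) (ent : PySem.Dict (Int × Int) (Int × Int))
      (F : List (Int × Int × (Int × Int))) (cnt : Int),
    MidInv n m E (S.add (cx, cy)) R ent F cnt →
    S.contains (cx, cy) = false →
    0 ≤ cx → cx < m → 0 ≤ cy → cy < n →
    loopA grid n m fuel (cx, cy) dc E R = loopB grid n m fuel cx cy dc S ent F cnt := by
  intro fuel
  induction fuel with
  | zero => intros; rfl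
  | succ fuel ih =>
    intro cx cy dc E R S ent F cnt hInv hSc hx0 hxm hy0 hyn
    simp only [loopA, loopB]
    by_cases hgoal : ((cx, cy) : Int × Int) = (m - 1, n - 1)
    · rw [if_pos hgoal, if_pos hgoal]
    · rw [if_neg hgoal, if_neg hgoal]
      simp only [List.foldl_cons, List.foldl_nil]
      rcases h1 : relaxB grid n m (S.add (cx, cy)) dc (F, ent, cnt) (cx-1, cy) with ⟨F1, ent1, cnt1⟩
      rcases h2 : relaxB grid n m (S.add (cx, cy)) dc (F1, ent1, cnt1) (cx+1, cy) with ⟨F2, ent2, cnt2⟩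
      rcases h3 : relaxB grid n m (S.add (cx, cy)) dc (F2, ent2, cnt2) (cx, cy-1) with ⟨F3, ent3, cnt3⟩
      rcases h4 : relaxB grid n m (S.add (cx, cy)) dc (F3, ent3, cnt3) (cx, cy+1) with ⟨F4, ent4, cnt4⟩
      have hI1 := relax_step grid n m E (S.add (cx, cy)) R ent F cnt cx cy dc (cx-1) cy
        (cx > 0) (by omega) hInv F1 ent1 cnt1 h1
      have hI2 := relax_step grid n m E (S.add (cx, cy)) _ ent1 F1 cnt1 cx cy dc (cx+1) cy
        (cx < m - 1) (by omega) hI1 F2 ent2 cnt2 h2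
      have hI3 := relax_step grid n m E (S.add (cx, cy)) _ ent2 F2 cnt2 cx cy dc cx (cy-1)
        (cy > 0) (by omega) hI2 F3 ent3 cnt3 h3
      have hI4 := relax_step grid n m E (S.add (cx, cy)) _ ent3 F3 cnt3 cx cy dc cx (cy+1)
        (cy < n - 1) (by omega) hI3 F4 ent4 cnt4 h4
      rw [findReachableA_eq grid n m E R cx cy dc]
      obtain ⟨hsize, hpop⟩ := pop_step n m E _ ent4 cnt4 (S.add (cx, cy)) F4 hI4
      cases hF4 : F4 with
      | nil =>
        rw [if_pos (hsize.mpr hF4)]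
      | cons e fr =>
        obtain ⟨d', t', w'⟩ := e
        obtain ⟨hmin, hd2, hInv', hS', hb'⟩ := hpop d' t' w' fr hF4
        rw [if_neg (by
          intro hz
          rw [hsize.mp hz] at hF4
          cases hF4)]
        rw [hmin, hd2]
        exact ih w'.1 w'.2 d' _ _ (S.add (cx, cy)) (ent4.erase w') fr cnt4 hInv' hS'
          hb'.1 hb'.2.1 hb'.2.2.1 hb'.2.2.2

theorem init_inv (n m : Int) :
    MidInv n m (PySem.Dict.empty.insert (0, 0) ((0, 0), 0)) (PySem.Set.empty.add ((0 : Int), (0 : Int)))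
      PySem.Dict.empty PySem.Dict.empty [] 0 := by
  refine ⟨?_, ?_, ?_, ?_, ?_, ?_, ?_, ?_, ?_, ?_⟩
  · intro w
    apply bool_eq_of_iff
    rw [PySem.Dict.contains_insert, PySem.Set.contains_iff, PySem.Set.mem_add]
    simp [PySem.Dict.contains_empty, PySem.Set.empty]
  · intro w
    simp [PySem.Dict.contains_empty]
  · intro w pr hpr
    simp [PySem.Dict.get?_empty] at hpr
  · exact List.Perm.refl _
  · exact List.Pairwise.nil
  · exact List.Pairwise.nil
  · intro w hw
    rw [PySem.Dict.contains_empty] at hw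
    cases hw
  · simp [PySem.Dict.keys_empty]
  · intro w hw
    rw [PySem.Dict.contains_empty] at hw
    cases hw
  · intro w hw
    rw [PySem.Dict.contains_empty] at hw
    cases hw

theorem run_eq (grid : List (List Int)) (hn : grid ≠ []) (hm : grid.headD [] ≠ []) (fuel : Nat) :
    loopA grid (grid.length : Int) ((grid.headD []).length : Int) fuel (0, 0) 0
      (PySem.Dict.empty.insert (0, 0) ((0, 0), 0)) PySem.Dict.empty
    = loopB grid (grid.length : Int) ((grid.headD []).length : Int) fuel 0 0 0
      PySem.Set.empty PySem.Dict.empty [] 0 := by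
  apply loop_eq
  · exact init_inv _ _
  · rfl
  · omega
  · have : 0 < (grid.headD []).length := List.length_pos_iff.mpr hm
    omega
  · omega
  · have : 0 < grid.length := List.length_pos_iff.mpr hn
    omega

theorem enlargeB_ne_nil (cave : List (List Int)) (hne : cave ≠ []) : enlargeB cave ≠ [] := by
  rw [enlargeB_char]
  obtain ⟨c0, rest, rfl⟩ : ∃ c0 rest, cave = c0 :: rest := by
    cases cave with
    | nil => exact absurd rfl hne
    | cons a l => exact ⟨a, l, rfl⟩
  simp [enlCanon]

theorem enlargeB_head_ne_nil (cave : List (List Int)) (hne : cave ≠ [])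
    (hhd : cave.headD [] ≠ []) : (enlargeB cave).headD [] ≠ [] := by
  rw [enlargeB_char]
  obtain ⟨c0, rest, rfl⟩ : ∃ c0 rest, cave = c0 :: rest := by
    cases cave with
    | nil => exact absurd rfl hne
    | cons a l => exact ⟨a, l, rfl⟩
  simp only [List.headD_cons] at hhd
  simp only [enlCanon, List.map_cons, List.cons_append, List.headD_cons]
  intro hcontr
  rw [rowExt] at hcontr
  cases c0 with
  | nil => exact hhd rfl
  | cons a l => cases hcontr


-- ===== VERDICT (by name: the statement is the Claim_ definition above) =====
theorem safest_path_spec : Claim_equal_safest_path := by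
  intro cave adv _ hpre
  obtain ⟨hne, hhd, hrect⟩ := hpre
  unfold Spec_safest_path safest_path safest_path_alt
  cases adv with
  | false =>
    simp only [Bool.not_false, ite_true, Bool.false_eq_true]
    exact run_eq cave hne hhd _
  | true =>
    simp only [Bool.not_true, ite_true]
    rw [enlarge_eq cave hne hrect]
    exact run_eq (enlargeB cave) (enlargeB_ne_nil cave hne) (enlargeB_head_ne_nil cave hne hhd) _
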